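-- pv_equiv track=rewrite | github.com/LukaSveigl/ULFRI-undergrad-coursework | year1/semester-1/programming-1 (P1)/Izpit/testi.py | valovi
-- ===== SOURCE A (Python) =====
-- def valovi(po_dnevih):
--     waves = []
--     wave = []
--     for pd in po_dnevih:
--         if pd != 0:
--             wave.append(pd)
--         else:
--             if wave:
--                 waves.append(sum(wave))
--                 wave = []
--     if wave:
--         waves.append(sum(wave))
--     return waves
-- ===== SOURCE B (Python) =====
-- def valovi(po_dnevih):
--     # Two-pointer run scan: find each maximal non-zero run, sum it while scanning.
--     out = []
--     i, n = 0, len(po_dnevih)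
--     while i < n:
--         if po_dnevih[i] == 0:
--             i += 1
--         else:
--             s = 0
--             j = i
--             while j < n and po_dnevih[j] != 0:
--                 s += po_dnevih[j]
--                 j += 1
--             out.append(s)
--             i = j
--     return out
-- ===== Notes on version B (the rewrite author's own statement) =====
-- stated objective: alternative
-- what changed: Replaced the buffer-and-flush fold (accumulating a run list and flushing its sum at each zero and at the end) with a two-pointer scan that locates each maximal non-zero run and sums it in place while advancing the index.
import Mathlib
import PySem

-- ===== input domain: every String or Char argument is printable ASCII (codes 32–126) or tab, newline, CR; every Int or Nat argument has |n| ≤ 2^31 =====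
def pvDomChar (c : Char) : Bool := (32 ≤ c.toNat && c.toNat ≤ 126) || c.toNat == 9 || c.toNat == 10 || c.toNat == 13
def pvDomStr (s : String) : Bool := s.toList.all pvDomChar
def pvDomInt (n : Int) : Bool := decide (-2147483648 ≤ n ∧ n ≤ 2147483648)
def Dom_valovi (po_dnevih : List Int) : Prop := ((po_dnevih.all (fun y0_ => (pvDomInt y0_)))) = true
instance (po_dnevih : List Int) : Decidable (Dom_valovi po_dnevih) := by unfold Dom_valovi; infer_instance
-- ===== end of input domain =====

-- ===== PORT A =====
-- B replaces A's buffer-and-flush fold with a two-pointer run scan (alternative decomposition, same cost).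
def valoviStep (s : List Int × List Int) (pd : Int) : List Int × List Int :=
  if pd ≠ 0 then (s.1, s.2 ++ [pd])
  else if ¬ s.2.isEmpty then (s.1 ++ [s.2.sum], []) else s

def valovi (po_dnevih : List Int) : List Int :=
  let s := po_dnevih.foldl valoviStep ([], [])
  if ¬ s.2.isEmpty then s.1 ++ [s.2.sum] else s.1

-- ===== PORT B =====
-- inner while loop: scan the current run, accumulating its sum; returns (sum, unscanned rest)
def valoviAltRun (s : Int) : List Int → Int × List Int
  | [] => (s, [])
  | y :: t => if y ≠ 0 then valoviAltRun (s + y) t else (s, y :: t)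

theorem valoviAltRun_len (s : Int) (l : List Int) : (valoviAltRun s l).2.length ≤ l.length := by
  induction l generalizing s with
  | nil => simp [valoviAltRun]
  | cons y t ih =>
    simp only [valoviAltRun]
    split
    · exact (ih _).trans (by simp)
    · simp

def valoviAltGo : List Int → List Int
  | [] => []
  | x :: rest =>
    if x = 0 then valoviAltGo rest
    else
      let p := valoviAltRun x rest
      p.1 :: valoviAltGo p.2
termination_by l => l.length
decreasing_by
  · simp
  · exact Nat.lt_succ_of_le (valoviAltRun_len x rest)

def valovi_alt (po_dnevih : List Int) : List Int := valoviAltGo po_dnevih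

-- ===== PRECONDITION & SPEC =====
def Spec_valovi (po_dnevih : List Int) (out : List Int) : Prop := out = valovi_alt po_dnevih
instance (po_dnevih : List Int) (out : List Int) : Decidable (Spec_valovi po_dnevih out) := by unfold Spec_valovi; infer_instance

-- ===== CLAIM (what is proved, stated in full; the proofs are below) =====
def Claim_equal_valovi : Prop := ∀ (po_dnevih : List Int), Dom_valovi po_dnevih → Spec_valovi po_dnevih (valovi po_dnevih)

-- ===== LEMMAS AND PROOFS =====
theorem valoviAltRun_spec (s : Int) (l : List Int) :
    valoviAltRun s l = (s + (l.takeWhile (fun y => y ≠ 0)).sum, l.dropWhile (fun y => y ≠ 0)) := by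
  induction l generalizing s with
  | nil => simp [valoviAltRun]
  | cons y t ih =>
    by_cases hy : y = 0
    · simp [valoviAltRun, hy, List.takeWhile, List.dropWhile]
    · simp [valoviAltRun, hy, ih, add_assoc]

theorem valoviAltGo_cons (x : Int) (t : List Int) (hx : x ≠ 0) :
    valoviAltGo (x :: t) =
      (x + (t.takeWhile (fun y => y ≠ 0)).sum) :: valoviAltGo (t.dropWhile (fun y => y ≠ 0)) := by
  rw [valoviAltGo]
  simp [hx, valoviAltRun_spec]

def pvFinalize (s : List Int × List Int) : List Int :=
  if ¬ s.2.isEmpty then s.1 ++ [s.2.sum] else s.1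

theorem valovi_key (l : List Int) : ∀ (waves wave : List Int),
    pvFinalize (l.foldl valoviStep (waves, wave)) =
      waves ++ (if wave.isEmpty then valoviAltGo l
                else (wave.sum + (l.takeWhile (fun y => y ≠ 0)).sum) ::
                     valoviAltGo (l.dropWhile (fun y => y ≠ 0))) := by
  induction l with
  | nil =>
    intro waves wave
    cases wave with
    | nil => simp [pvFinalize, valoviAltGo]
    | cons a b => simp [pvFinalize, valoviAltGo]
  | cons x t ih =>
    intro waves wave
    by_cases hx : x = 0
    · subst hx
      cases wave with
      | nil =>
        simp only [List.foldl_cons, valoviStep, List.isEmpty_nil]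
        simp [ih, valoviAltGo]
      | cons a b =>
        simp only [List.foldl_cons, valoviStep]
        simp [ih, valoviAltGo]
    · simp only [List.foldl_cons, valoviStep, hx, if_pos, ne_eq, not_false_iff]
      rw [ih]
      cases wave with
      | nil =>
        simp [valoviAltGo_cons x t hx]
      | cons a b =>
        simp [hx, add_assoc]

-- ===== VERDICT (by name: the statement is the Claim_ definition above) =====
theorem valovi_spec : Claim_equal_valovi := by
  intro po_dnevih _
  unfold Spec_valovi valovi valovi_alt
  have h := valovi_key po_dnevih [] []
  simpa [pvFinalize] using h
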